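-- pv_equiv track=rewrite | github.com/Circles360/Circles360.github.io | webscraper/see_conditions.py | split_conditions
-- ===== SOURCE A (Python) =====
-- def split_conditions(raw):
--     split = []
--
--     for requisite in raw.split(";"):
--         for cond in requisite.split(" AND "):
--             no_white_space = cond.strip()
--             if no_white_space == "":
--                 continue
--             split.append(no_white_space)
--
--     return split
-- ===== SOURCE B (Python) =====
-- def split_conditions(raw):
--     result = []
--     token = []
--
--     def flush():
--         t = "".join(token).strip()
--         if t:
--             result.append(t)
--         token.clear()
--
--     i = 0
--     n = len(raw)
--     while i < n:
--         if raw[i] == ";":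
--             flush()
--             i += 1
--         elif raw.startswith(" AND ", i):
--             flush()
--             i += 5
--         else:
--             token.append(raw[i])
--             i += 1
--     flush()
--     return result
-- ===== Notes on version B (the rewrite author's own statement) =====
-- stated objective: alternative
-- what changed: Replaces A's nested semicolon-split then AND-split passes by one flat left-to-right scan over the characters that cuts a token at each semicolon and at each AND separator, stripping and filtering tokens as they are flushed.
import Mathlib
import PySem

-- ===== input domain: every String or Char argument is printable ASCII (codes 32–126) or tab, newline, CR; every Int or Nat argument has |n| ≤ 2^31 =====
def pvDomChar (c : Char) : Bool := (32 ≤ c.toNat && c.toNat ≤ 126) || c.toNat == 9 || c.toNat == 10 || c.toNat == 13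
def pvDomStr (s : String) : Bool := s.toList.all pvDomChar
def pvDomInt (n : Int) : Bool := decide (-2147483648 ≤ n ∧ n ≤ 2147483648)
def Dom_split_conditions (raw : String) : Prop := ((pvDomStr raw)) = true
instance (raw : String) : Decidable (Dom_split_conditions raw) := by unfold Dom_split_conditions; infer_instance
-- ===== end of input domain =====

-- B replaces A's nested semicolon-split / AND-split passes by one flat left-to-right
-- scan that cuts tokens at both separators and strips/filters them as it goes
-- (alternative decomposition; not claimed faster).

-- ===== PORT A =====
-- A, step for step: outer loop over raw.split(";"), inner loop over requisite.split(" AND "),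
-- strip, skip empties, append.  Strings are handled on .toList via PySem.Chars (exact).
def split_conditions (raw : String) : List String :=
  let split : List String := []
  let split := (PySem.Chars.splitOn raw.toList [';']).foldl (fun split requisite =>
    (PySem.Chars.splitOn requisite [' ', 'A', 'N', 'D', ' ']).foldl (fun split cond =>
      let no_white_space := PySem.Chars.strip cond
      if no_white_space = [] then split
      else split ++ [String.ofList no_white_space]) split) split
  split

-- ===== PORT B =====
-- Source B's flush(): join the token, strip it, append if non-empty, clear the token.
def pvFlush (token : List Char) (result : List String) : List String :=
  let t := PySem.Chars.strip token
  if t = [] then result else result ++ [String.ofList t]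

-- Source B's while loop: one pass over the characters, cutting at ';' and at " AND ".
def pvScan (l token : List Char) (result : List String) : List String :=
  match l with
  | [] => pvFlush token result
  | c :: rest =>
    if c = ';' then pvScan rest [] (pvFlush token result)
    else if [' ', 'A', 'N', 'D', ' '].isPrefixOf (c :: rest) then
      pvScan ((c :: rest).drop 5) [] (pvFlush token result)
    else pvScan rest (token ++ [c]) result
termination_by l.length
decreasing_by all_goals (simp; try omega)

def split_conditions_alt (raw : String) : List String :=
  pvScan raw.toList [] []

-- ===== PRECONDITION & SPEC =====
def Spec_split_conditions (raw : String) (out : List String) : Prop := out = split_conditions_alt raw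
instance (raw : String) (out : List String) : Decidable (Spec_split_conditions raw out) := by unfold Spec_split_conditions; infer_instance

-- ===== CLAIM (what is proved, stated in full; the proofs are below) =====
def Claim_equal_split_conditions : Prop := ∀ (raw : String), Dom_split_conditions raw → Spec_split_conditions raw (split_conditions raw)

-- ===== LEMMAS AND PROOFS =====

-- apply f to the head of a list ([] is treated as a single empty piece)
def pvMapHd (f : List Char → List Char) : List (List Char) → List (List Char)
  | [] => [f []]
  | h :: t => f h :: t

-- fuel-free reference for PySem.Chars.splitOn
def pvSplit (sep : List Char) (l : List Char) : List (List Char) :=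
  match l with
  | [] => [[]]
  | c :: rest =>
    if sep.isPrefixOf (c :: rest) ∧ sep ≠ [] then
      [] :: pvSplit sep ((c :: rest).drop sep.length)
    else pvMapHd (c :: ·) (pvSplit sep rest)
termination_by l.length
decreasing_by
  · rename_i h
    have hne := h.2
    cases sep with
    | nil => simp at hne
    | cons a s => simp
  · simp

-- token-level version of B's scan (flushing deferred)
def pvScanT (l token : List Char) : List (List Char) :=
  match l with
  | [] => [token]
  | c :: rest =>
    if c = ';' then token :: pvScanT rest []
    else if [' ', 'A', 'N', 'D', ' '].isPrefixOf (c :: rest) then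
      token :: pvScanT ((c :: rest).drop 5) []
    else pvScanT rest (token ++ [c])
termination_by l.length
decreasing_by all_goals (simp; try omega)

def pvTokens (l : List Char) : List (List Char) :=
  (pvSplit [';'] l).flatMap (pvSplit [' ', 'A', 'N', 'D', ' '])

theorem pvMapHd_ne_nil (f : List Char → List Char) (xs : List (List Char)) :
    pvMapHd f xs ≠ [] := by cases xs <;> simp [pvMapHd]

theorem pvSplit_ne_nil (sep l : List Char) : pvSplit sep l ≠ [] := by
  cases l with
  | nil => simp [pvSplit]
  | cons c rest =>
    rw [pvSplit]
    split
    · simp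
    · exact pvMapHd_ne_nil _ _

theorem pvMapHd_comp (f g : List Char → List Char) (xs : List (List Char)) :
    pvMapHd f (pvMapHd g xs) = pvMapHd (fun x => f (g x)) xs := by
  cases xs <;> simp [pvMapHd]

theorem pvMapHd_id (xs : List (List Char)) (h : xs ≠ []) : pvMapHd id xs = xs := by
  cases xs <;> simp [pvMapHd] at *

theorem pvMapHd_append (f : List Char → List Char) (xs ys : List (List Char)) (h : xs ≠ []) :
    pvMapHd f (xs ++ ys) = pvMapHd f xs ++ ys := by
  cases xs <;> simp [pvMapHd] at *

-- PySem.Chars.splitOn.go with enough fuel computes pvSplit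
theorem pvGo_eq (sep : List Char) (hsep : sep ≠ []) :
    ∀ (fuel : Nat) (l cur : List Char) (acc : List (List Char)), l.length < fuel →
    PySem.Chars.splitOn.go sep fuel l cur acc =
      acc.reverse ++ pvMapHd (cur.reverse ++ ·) (pvSplit sep l) := by
  intro fuel
  induction fuel with
  | zero => intro l cur acc h; omega
  | succ fuel ih =>
    have hlen : sep.length ≠ 0 := by simpa using hsep
    intro l cur acc h
    cases l with
    | nil => simp [PySem.Chars.splitOn.go, pvSplit, pvMapHd]
    | cons c rest =>
      rw [PySem.Chars.splitOn.go]
      by_cases hp : sep.isPrefixOf (c :: rest) = true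
      · rw [if_pos hp, ih _ _ _ (by simp only [List.length_drop, List.length_cons] at h ⊢; omega),
           pvSplit, if_pos ⟨hp, hsep⟩]
        rw [show ((([] : List Char)).reverse ++ ·) = id from by funext x; rfl]
        rw [pvMapHd_id _ (pvSplit_ne_nil _ _)]
        simp [pvMapHd]
      · rw [if_neg hp, ih _ _ _ (by simp only [List.length_cons] at h; omega),
           pvSplit, if_neg (by tauto), pvMapHd_comp]
        have hf : ((c :: cur).reverse ++ ·) = (fun x => cur.reverse ++ (c :: x)) := by
          funext x; rw [List.reverse_cons, List.append_assoc]; rfl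
        rw [hf]

theorem pvSplitOn_eq (sep l : List Char) (hsep : sep ≠ []) :
    PySem.Chars.splitOn l sep = pvSplit sep l := by
  unfold PySem.Chars.splitOn
  rw [pvGo_eq sep hsep (l.length + 1) l [] [] (by omega)]
  rw [show ((([] : List Char)).reverse ++ ·) = id from by funext x; rfl]
  rw [pvMapHd_id _ (pvSplit_ne_nil _ _)]
  simp

theorem pvSplit_head_prefix (sep l : List Char) :
    ∃ h t, pvSplit sep l = h :: t ∧ h <+: l := by
  generalize hn : l.length = n
  induction n using Nat.strong_induction_on generalizing l with
  | _ n ih =>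
  cases l with
  | nil => exact ⟨[], [], by simp [pvSplit], List.nil_prefix⟩
  | cons c rest =>
    rw [pvSplit]
    split
    · exact ⟨[], _, rfl, List.nil_prefix⟩
    · obtain ⟨h, t, he, hp⟩ := ih rest.length (by subst hn; simp) rest rfl
      rw [he]
      exact ⟨c :: h, t, by simp [pvMapHd], by simpa [List.cons_prefix_cons] using hp⟩

-- a prefix containing no occurrence of the single-char separator distributes over the head
theorem pvSplit_single_append (a : Char) (pre l : List Char) (h : a ∉ pre) :
    pvSplit [a] (pre ++ l) = pvMapHd (pre ++ ·) (pvSplit [a] l) := by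
  induction pre with
  | nil =>
    rw [show ((([] : List Char)) ++ ·) = id from funext fun x => rfl]
    rw [pvMapHd_id _ (pvSplit_ne_nil _ _), List.nil_append]
  | cons c pre ih =>
    have hc : c ≠ a := fun hca => h (by simp [hca])
    have hpre : a ∉ pre := fun hm => h (by simp [hm])
    rw [List.cons_append, pvSplit,
        if_neg (by simp [List.isPrefixOf]; intro hca; exact (hc hca.symm).elim),
        ih hpre, pvMapHd_comp]
    rw [show ((c :: pre) ++ ·) = (fun x => c :: (pre ++ x)) from funext fun x => rfl]

theorem pvTokens_ne_nil (l : List Char) : pvTokens l ≠ [] := by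
  intro hcontra
  obtain ⟨h0, t0, he, -⟩ := pvSplit_head_prefix [';'] l
  unfold pvTokens at hcontra
  rw [he, List.flatMap_cons] at hcontra
  rcases List.append_eq_nil_iff.mp hcontra with ⟨h1, -⟩
  exact pvSplit_ne_nil _ _ h1

-- key lemma: the one-pass token scan equals nested splitting
theorem pvMapHd_nil_append (xs : List (List Char)) (h : xs ≠ []) :
    pvMapHd (([] : List Char) ++ ·) xs = xs := by
  rw [show ((([] : List Char)) ++ ·) = id from funext fun x => rfl]
  exact pvMapHd_id xs h

theorem pvScanT_eq (l : List Char) : ∀ token, pvScanT l token = pvMapHd (token ++ ·) (pvTokens l) := by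
  generalize hn : l.length = n
  induction n using Nat.strong_induction_on generalizing l with
  | _ n ih =>
  intro token
  cases l with
  | nil => simp [pvScanT, pvTokens, pvSplit, List.flatMap_cons, pvMapHd]
  | cons c rest =>
    rw [pvScanT]
    by_cases hc : c = ';'
    · subst hc
      rw [if_pos rfl]
      have hT : pvTokens (';' :: rest) = [] :: pvTokens rest := by
        unfold pvTokens
        rw [pvSplit, if_pos ⟨by simp [List.isPrefixOf], by simp⟩]
        simp only [List.length_cons, List.length_nil, List.drop_succ_cons, List.drop_zero,
          List.flatMap_cons]
        rw [show pvSplit [' ', 'A', 'N', 'D', ' '] [] = [[]] from by simp [pvSplit]]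
        rfl
      rw [hT, ih rest.length (by subst hn; simp) rest rfl [],
          pvMapHd_nil_append _ (pvTokens_ne_nil _)]
      simp [pvMapHd]
    · rw [if_neg hc]
      by_cases hA : [' ', 'A', 'N', 'D', ' '].isPrefixOf (c :: rest) = true
      · rw [if_pos hA]
        obtain ⟨r, hr⟩ := List.isPrefixOf_iff_prefix.mp hA
        have hdrop : List.drop 5 (c :: rest) = r := by
          rw [← hr]; rfl
        have hT : pvTokens (c :: rest) = [] :: pvTokens r := by
          unfold pvTokens
          rw [← hr, pvSplit_single_append ';' _ _ (by decide)]
          obtain ⟨h0, t0, he0, -⟩ := pvSplit_head_prefix [';'] r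
          rw [he0]
          show List.flatMap _ (([' ', 'A', 'N', 'D', ' '] ++ h0) :: t0) = _
          rw [List.flatMap_cons]
          rw [show ([' ', 'A', 'N', 'D', ' '] ++ h0) = ' ' :: ('A' :: ('N' :: ('D' :: (' ' :: h0)))) from rfl]
          rw [pvSplit, if_pos ⟨by rw [List.isPrefixOf_iff_prefix]
                                  exact ⟨h0, rfl⟩, by simp⟩]
          rw [show List.drop ([' ', 'A', 'N', 'D', ' '] : List Char).length
                (' ' :: ('A' :: ('N' :: ('D' :: (' ' :: h0))))) = h0 from rfl]
          rw [List.flatMap_cons]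
          rfl
        have hlt : r.length < n := by
          subst hn
          have : (c :: rest).length = 5 + r.length := by
            rw [← hr]; simp only [List.length_append, List.length_cons, List.length_nil]
          omega
        rw [hdrop, hT, ih r.length hlt r rfl [], pvMapHd_nil_append _ (pvTokens_ne_nil _)]
        simp [pvMapHd]
      · rw [if_neg hA]
        have hT : pvTokens (c :: rest) = pvMapHd (c :: ·) (pvTokens rest) := by
          unfold pvTokens
          obtain ⟨h0, t0, he0, hp0⟩ := pvSplit_head_prefix [';'] rest
          rw [pvSplit, if_neg (by simp [List.isPrefixOf]; intro h'; exact (hc h'.symm).elim), he0]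
          show List.flatMap _ ((c :: h0) :: t0) = _
          rw [List.flatMap_cons]
          have hA' : ¬ ([' ', 'A', 'N', 'D', ' '].isPrefixOf (c :: h0) = true ∧
              ([' ', 'A', 'N', 'D', ' '] : List Char) ≠ []) := by
            rintro ⟨hpre, -⟩
            exact hA (List.isPrefixOf_iff_prefix.mpr
              ((List.isPrefixOf_iff_prefix.mp hpre).trans
                (List.cons_prefix_cons.mpr ⟨rfl, hp0⟩)))
          rw [pvSplit, if_neg hA']
          rw [List.flatMap_cons, pvMapHd_append _ _ _ (pvSplit_ne_nil _ _)]
        rw [hT, ih rest.length (by subst hn; simp) rest rfl (token ++ [c]), pvMapHd_comp]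
        rw [show (fun x => token ++ (c :: x)) = ((token ++ [c]) ++ ·) from
          funext fun x => by simp]

-- B's scan = flush-fold over the token scan
theorem pvScan_eq_foldl (l : List Char) : ∀ token acc,
    pvScan l token acc = (pvScanT l token).foldl (fun acc t => pvFlush t acc) acc := by
  generalize hn : l.length = n
  induction n using Nat.strong_induction_on generalizing l with
  | _ n ih =>
  intro token acc
  cases l with
  | nil => simp [pvScan, pvScanT]
  | cons c rest =>
    rw [pvScan, pvScanT]
    by_cases hc : c = ';'
    · rw [if_pos hc, if_pos hc, List.foldl_cons,
          ih rest.length (by subst hn; simp) rest rfl]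
    · rw [if_neg hc, if_neg hc]
      by_cases hA : [' ', 'A', 'N', 'D', ' '].isPrefixOf (c :: rest) = true
      · rw [if_pos hA, if_pos hA, List.foldl_cons,
            ih (List.drop 5 (c :: rest)).length (by subst hn; simp) _ rfl]
      · rw [if_neg hA, if_neg hA, ih rest.length (by subst hn; simp) rest rfl]

theorem pvFoldl_flatMap {α β γ : Type} (f : α → List β) (g : γ → β → γ) :
    ∀ (xs : List α) (init : γ),
      xs.foldl (fun b a => (f a).foldl g b) init = (xs.flatMap f).foldl g init := by
  intro xs
  induction xs with
  | nil => intro init; simp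
  | cons x xs ihx => intro init; rw [List.flatMap_cons, List.foldl_append, List.foldl_cons, ihx]

-- ===== VERDICT (by name: the statement is the Claim_ definition above) =====
theorem split_conditions_spec : Claim_equal_split_conditions := by
  intro raw _
  unfold Spec_split_conditions split_conditions split_conditions_alt
  have hin : ∀ req : List Char, PySem.Chars.splitOn req [' ', 'A', 'N', 'D', ' '] =
      pvSplit [' ', 'A', 'N', 'D', ' '] req := fun req => pvSplitOn_eq _ _ (by simp)
  simp only [hin, pvSplitOn_eq [';'] raw.toList (by simp)]
  rw [pvFoldl_flatMap, pvScan_eq_foldl, pvScanT_eq,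
      pvMapHd_nil_append _ (pvTokens_ne_nil _)]
  rfl
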